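-- pv_equiv track=rewrite | github.com/k3liang/Boolean-Minimization | quine-mccluskey/pit.py | createPIT
-- ===== SOURCE A (Python) =====
-- from collections import defaultdict # Dictionaries that take a default for missing entries
-- from itertools import product # will help with a sort of "cartesian product" for {0,1} x {0,1} x ...
--
-- def minterms(imp):
--     dash_index = [i for i,c in enumerate(imp) if c =='-']
--
--     # base case
--     if not dash_index:
--         return {imp}
--
--     all_minterms = set()
--     for case in product('01', repeat=len(dash_index)):
--         case_minterm = list(imp)
--         for i in range(len(dash_index)):
--             case_minterm[dash_index[i]] = case[i]
--         all_minterms.add("".join(case_minterm))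
--
--     return all_minterms
--
-- def createPIT(primes):
--     rows = defaultdict(set) # prime implicant is the key
--     cols = defaultdict(set) # minterm is the key
--
--     for prime in primes:
--         minterms_ = minterms(prime)
--         rows[prime].update(minterms_)
--
--         for m in minterms_:
--             cols[m].add(prime)
--
--     return (rows,cols)
-- ===== SOURCE B (Python) =====
-- from collections import defaultdict
--
-- def _expand(imp):
--     # incremental doubling over the characters, right to left:
--     # res holds all suffix-expansions seen so far
--     res = ['']
--     for c in reversed(imp):
--         if c == '-':
--             res = ['0' + s for s in res] + ['1' + s for s in res]
--         else:
--             res = [c + s for s in res]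
--     return res
--
-- def createPIT(primes):
--     rows = defaultdict(set)
--     cols = defaultdict(set)
--     for prime in primes:
--         ms = _expand(prime)
--         rows[prime].update(ms)
--         for m in ms:
--             cols[m].add(prime)
--     return (rows, cols)
-- ===== Notes on version B (the rewrite author's own statement) =====
-- stated objective: alternative
-- what changed: The minterms helper's dash-index list, itertools.product over {0,1}^k and per-case index substitution are replaced by a single right-to-left incremental-doubling pass over the implicant's characters that maintains the list of expanded suffixes; the two-map build over primes is kept.
import Mathlib
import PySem

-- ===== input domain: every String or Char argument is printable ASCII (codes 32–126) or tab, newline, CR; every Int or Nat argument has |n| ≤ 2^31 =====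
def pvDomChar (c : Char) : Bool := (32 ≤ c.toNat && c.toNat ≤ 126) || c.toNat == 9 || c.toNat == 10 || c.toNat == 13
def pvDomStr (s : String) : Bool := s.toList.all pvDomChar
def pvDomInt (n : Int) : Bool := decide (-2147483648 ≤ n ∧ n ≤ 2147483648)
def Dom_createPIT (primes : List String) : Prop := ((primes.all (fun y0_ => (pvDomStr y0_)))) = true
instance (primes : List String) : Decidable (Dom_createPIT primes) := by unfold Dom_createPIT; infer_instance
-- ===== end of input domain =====

-- B replaces minterms' itertools.product enumeration + indexed substitution by an
-- incremental right-to-left doubling pass over the implicant (objective: alternative).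


-- ===== PORT A =====
-- dash_index = [i for i,c in enumerate(imp) if c=='-']; enumerate indices are ≥ 0, so .toNat is exact
def pvDashIdx (l : List Char) : List Nat :=
  ((PySem.List.enumerate l 0).filter (fun p => p.2 == '-')).map (fun p => p.1.toNat)

-- product('01', repeat=k): leftmost coordinate varies slowest
def pvProd01 : Nat → List (List Char)
  | 0 => [[]]
  | k + 1 => (['0', '1'] : List Char).flatMap (fun c => (pvProd01 k).map (fun cs => c :: cs))

-- for i in range(len(dash_index)): case_minterm[dash_index[i]] = case[i]
-- (both indices are always in range in the Python; the getD defaults are never reached)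
def pvApplyCase (ds : List Nat) (cse : List Char) (cm : List Char) : List Char :=
  (List.range ds.length).foldl (fun acc i => acc.set (ds.getD i 0) (cse.getD i ' ')) cm

def pvMintermsA (imp : String) : PySem.Set String :=
  let ds := pvDashIdx imp.toList
  if ds = [] then
    PySem.Set.add PySem.Set.empty imp
  else
    (pvProd01 ds.length).foldl
      (fun s cse => PySem.Set.add s (String.ofList (pvApplyCase ds cse imp.toList)))
      PySem.Set.empty

def pvStepA (st : PySem.Dict String (PySem.Set String) × PySem.Dict String (PySem.Set String))
    (prime : String) :
    PySem.Dict String (PySem.Set String) × PySem.Dict String (PySem.Set String) :=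
  let ms := pvMintermsA prime
  (st.1.insert prime (PySem.Set.update (st.1.getD prime PySem.Set.empty) ms),
   ms.foldl (fun d m => d.insert m (PySem.Set.add (d.getD m PySem.Set.empty) prime)) st.2)

def createPIT (primes : List String) : (List (String × List String)) × (List (String × List String)) :=
  let st := primes.foldl pvStepA (PySem.Dict.empty, PySem.Dict.empty)
  (st.1.items, st.2.items)

-- ===== PORT B =====
-- res = ['']; for c in reversed(imp): res = ['0'+s for s in res]+['1'+s for s in res] if c=='-' else [c+s for s in res]
def pvExpand (l : List Char) : List (List Char) :=
  l.foldr
    (fun c res =>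
      if c = '-' then res.map (fun s => '0' :: s) ++ res.map (fun s => '1' :: s)
      else res.map (fun s => c :: s))
    [[]]

def pvStepB (st : PySem.Dict String (PySem.Set String) × PySem.Dict String (PySem.Set String))
    (prime : String) :
    PySem.Dict String (PySem.Set String) × PySem.Dict String (PySem.Set String) :=
  let ms := (pvExpand prime.toList).map String.ofList
  (st.1.insert prime (PySem.Set.update (st.1.getD prime PySem.Set.empty) ms),
   ms.foldl (fun d m => d.insert m (PySem.Set.add (d.getD m PySem.Set.empty) prime)) st.2)

def createPIT_alt (primes : List String) : (List (String × List String)) × (List (String × List String)) :=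
  let st := primes.foldl pvStepB (PySem.Dict.empty, PySem.Dict.empty)
  (st.1.items, st.2.items)

-- ===== PRECONDITION & SPEC =====
def Spec_createPIT (primes : List String) (out : (List (String × List String)) × (List (String × List String))) : Prop := out = createPIT_alt primes
instance (primes : List String) (out : (List (String × List String)) × (List (String × List String))) : Decidable (Spec_createPIT primes out) := by unfold Spec_createPIT; infer_instance

-- ===== CLAIM (what is proved, stated in full; the proofs are below) =====
def Claim_equal_createPIT : Prop := ∀ (primes : List String), Dom_createPIT primes → Spec_createPIT primes (createPIT primes)

-- ===== LEMMAS AND PROOFS =====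

-- dash indices from an arbitrary enumerate start (proof helper; pvDashIdx l = pvDIdx 0 l)
def pvDIdx (n : Int) (l : List Char) : List Nat :=
  ((PySem.List.enumerate l n).filter (fun p => p.2 == '-')).map (fun p => p.1.toNat)

theorem pvDashIdx_eq (l : List Char) : pvDashIdx l = pvDIdx 0 l := rfl

theorem pvDIdx_cons (n : Int) (c : Char) (cs : List Char) :
    pvDIdx n (c :: cs) = if c = '-' then n.toNat :: pvDIdx (n + 1) cs else pvDIdx (n + 1) cs := by
  simp only [pvDIdx, PySem.List.enumerate_cons, List.filter_cons]
  by_cases h : c = '-' <;> simp [h]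

theorem pvDIdx_shift (l : List Char) : ∀ n : Int, 0 ≤ n →
    pvDIdx (n + 1) l = (pvDIdx n l).map (fun x => x + 1) := by
  induction l with
  | nil => intro n _; rfl
  | cons c cs ih =>
    intro n hn
    rw [pvDIdx_cons, pvDIdx_cons, ih (n + 1) (by omega)]
    by_cases h : c = '-' <;> simp [h, Int.toNat_add hn (by omega : (0:Int) ≤ 1)]

theorem pvExpand_cons (c : Char) (cs : List Char) :
    pvExpand (c :: cs) =
      if c = '-' then (pvExpand cs).map (fun s => '0' :: s) ++ (pvExpand cs).map (fun s => '1' :: s)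
      else (pvExpand cs).map (fun s => c :: s) := rfl

theorem getD_tail (cse : List Char) (i : Nat) (d : Char) :
    cse.getD (i + 1) d = cse.tail.getD i d := by
  cases cse <;> simp [List.getD]

theorem pvApplyCase_cons (d : Nat) (ds : List Nat) (cse cm : List Char) :
    pvApplyCase (d :: ds) cse cm = pvApplyCase ds cse.tail (cm.set d (cse.headD ' ')) := by
  simp only [pvApplyCase, List.length_cons, List.range_succ_eq_map, List.foldl_cons, List.foldl_map]
  have h2 : cse.getD 0 ' ' = cse.headD ' ' := by cases cse <;> rfl
  rw [show (d :: ds).getD 0 0 = d from rfl, h2]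
  exact PySem.List.foldl_congr_mem _ _ _ _ (fun acc i _ => by
    rw [show (d :: ds).getD (i + 1) 0 = ds.getD i 0 from rfl, getD_tail])

theorem pvApplyCase_shift (ds : List Nat) : ∀ (cse : List Char) (c : Char) (cm : List Char),
    pvApplyCase (ds.map (fun x => x + 1)) cse (c :: cm) = c :: pvApplyCase ds cse cm := by
  induction ds with
  | nil => intro cse c cm; rfl
  | cons d ds ih =>
    intro cse c cm
    rw [List.map_cons, pvApplyCase_cons, List.set_cons_succ, ih, pvApplyCase_cons]

theorem pvProd01_map_applyCase (l : List Char) :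
    (pvProd01 (pvDIdx 0 l).length).map (fun cse => pvApplyCase (pvDIdx 0 l) cse l) = pvExpand l := by
  induction l with
  | nil => rfl
  | cons c cs ih =>
    rw [pvDIdx_cons, pvDIdx_shift cs 0 le_rfl]
    by_cases h : c = '-'
    · subst h
      rw [if_pos rfl]
      simp only [Int.toNat_zero, List.length_cons, List.length_map]
      rw [pvExpand_cons, if_pos rfl, ← ih]
      simp only [pvProd01, List.flatMap_cons, List.flatMap_nil, List.append_nil,
        List.map_append, List.map_map]
      congr 1
      · apply List.map_congr_left
        intro cse _
        simp only [Function.comp_apply]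
        rw [pvApplyCase_cons]
        simp only [List.tail_cons, List.headD_cons, List.set_cons_zero]
        exact pvApplyCase_shift _ _ _ _
      · apply List.map_congr_left
        intro cse _
        simp only [Function.comp_apply]
        rw [pvApplyCase_cons]
        simp only [List.tail_cons, List.headD_cons, List.set_cons_zero]
        exact pvApplyCase_shift _ _ _ _
    · rw [if_neg h]
      simp only [List.length_map]
      rw [pvExpand_cons, if_neg h, ← ih, List.map_map]
      apply List.map_congr_left
      intro cse _
      simp only [Function.comp_apply]
      exact pvApplyCase_shift _ _ _ _

theorem pvExpand_nodup (l : List Char) : (pvExpand l).Nodup := by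
  induction l with
  | nil => simp [pvExpand]
  | cons c cs ih =>
    rw [pvExpand_cons]
    by_cases h : c = '-'
    · rw [if_pos h]
      apply List.Nodup.append
      · exact ih.map (fun a b hab => by simpa using hab)
      · exact ih.map (fun a b hab => by simpa using hab)
      · intro x hx hy
        simp only [List.mem_map] at hx hy
        obtain ⟨a, _, ha⟩ := hx
        obtain ⟨b, _, hb⟩ := hy
        rw [← ha] at hb
        simp at hb
    · rw [if_neg h]
      exact ih.map (fun a b hab => by simpa using hab)

theorem pvExpand_no_dash (l : List Char) (h : '-' ∉ l) : pvExpand l = [l] := by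
  induction l with
  | nil => rfl
  | cons c cs ih =>
    have hc : c ≠ '-' := fun hc => h (by simp [hc])
    rw [pvExpand_cons, if_neg hc, ih (fun hm => h (List.mem_cons_of_mem _ hm))]
    rfl

theorem pvOfList_inj : Function.Injective String.ofList := by
  intro a b h
  have := congrArg String.toList h
  rwa [String.toList_ofList, String.toList_ofList] at this

theorem pvMap_ofList (l : List Char) :
    (pvProd01 (pvDIdx 0 l).length).map
        (fun cse => String.ofList (pvApplyCase (pvDIdx 0 l) cse l)) =
      (pvExpand l).map String.ofList := by
  have h := congrArg (List.map String.ofList) (pvProd01_map_applyCase l)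
  rw [List.map_map] at h
  exact h

theorem pvMinterms_eq (imp : String) :
    pvMintermsA imp = (pvExpand imp.toList).map String.ofList := by
  simp only [pvMintermsA, pvDashIdx_eq]
  by_cases h : pvDIdx 0 imp.toList = []
  · rw [if_pos h]
    have hfil : (PySem.List.enumerate imp.toList 0).filter (fun p => p.2 == '-') = [] :=
      List.map_eq_nil_iff.mp h
    have hnm : '-' ∉ imp.toList := by
      intro hm
      obtain ⟨k, hk, hck⟩ := List.mem_iff_getElem.mp hm
      have hmem : ((0 : Int) + k, imp.toList[k]) ∈ PySem.List.enumerate imp.toList 0 :=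
        (PySem.List.mem_enumerate_iff _ _ _).mpr ⟨k, hk, rfl⟩
      have hmf : ((0 : Int) + k, imp.toList[k]) ∈
          (PySem.List.enumerate imp.toList 0).filter (fun p => p.2 == '-') :=
        List.mem_filter.mpr ⟨hmem, by simp [hck]⟩
      rw [hfil] at hmf
      simp at hmf
    rw [pvExpand_no_dash _ hnm]
    simp only [List.map_cons, List.map_nil, String.ofList_toList]
    rfl
  · rw [if_neg h, ← PySem.Set.update_map_eq_foldl_add, PySem.Set.update_empty, pvMap_ofList]
    exact PySem.Set.ofList_eq_self_of_nodup _
      ((pvExpand_nodup imp.toList).map (fun a b hab => pvOfList_inj hab))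

theorem pvStep_eq : pvStepA = pvStepB := by
  funext st prime
  simp only [pvStepA, pvStepB, pvMinterms_eq]

-- ===== VERDICT (by name: the statement is the Claim_ definition above) =====
theorem createPIT_spec : Claim_equal_createPIT := by
  intro primes _
  show createPIT primes = createPIT_alt primes
  simp only [createPIT, createPIT_alt, pvStep_eq]
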